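-- pv_equiv track=rewrite | github.com/giuliahuang/AdventOfCode | 2025/6.py | do_operation
-- ===== SOURCE A (Python) =====
-- def do_operation(number_list, operations):
--
--     map = {
--         '+': lambda x,y: x+y,
--         '*': lambda x,y: x*y
--     }
--
--     result_list = []
--
--     for op in operations:
--         if op == '+':
--             result_list.append(0)
--         else:
--             result_list.append(1)
--
--     for row in number_list:
--         for i, n in enumerate(row):
--             result_list[i] = map[operations[i]](result_list[i],n)
--
--
--     return sum(result_list)
-- ===== SOURCE B (Python) =====
-- def do_operation(number_list, operations):
--     total = 0
--     for i, op in enumerate(operations):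
--         acc = 0 if op == '+' else 1
--         for row in number_list:
--             if i < len(row):
--                 if op == '+':
--                     acc += row[i]
--                 elif op == '*':
--                     acc *= row[i]
--                 else:
--                     raise KeyError(op)
--         total += acc
--     return total
-- ===== Notes on version B (the rewrite author's own statement) =====
-- stated objective: alternative
-- what changed: Column-major traversal: instead of A's accumulator vector updated in place row by row via a lambda dict, B reduces one column at a time with a seeded scalar accumulator (validating the operator) and adds each column's result to a running total.
import Mathlib
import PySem

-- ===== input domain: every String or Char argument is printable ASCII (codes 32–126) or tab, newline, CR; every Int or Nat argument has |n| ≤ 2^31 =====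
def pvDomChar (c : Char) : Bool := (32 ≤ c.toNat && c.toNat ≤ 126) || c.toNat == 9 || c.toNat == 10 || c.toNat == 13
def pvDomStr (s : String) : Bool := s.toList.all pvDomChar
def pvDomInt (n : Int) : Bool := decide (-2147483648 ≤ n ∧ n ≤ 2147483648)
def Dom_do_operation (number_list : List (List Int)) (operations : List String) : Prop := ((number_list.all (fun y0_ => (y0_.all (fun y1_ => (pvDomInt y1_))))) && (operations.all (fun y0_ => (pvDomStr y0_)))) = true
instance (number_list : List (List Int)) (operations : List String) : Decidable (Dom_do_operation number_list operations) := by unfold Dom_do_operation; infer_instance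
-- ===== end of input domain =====

-- B traverses column-major (one reduction per column) instead of A's row-by-row accumulator vector; alternative decomposition, same cost.


-- ===== PORT A =====
-- map[op](x, y); exact for op ∈ {"+", "*"}; any other op at a touched index is a KeyError in Python, excluded by Pre_.
def applyOpA (op : String) (x y : Int) : Int := if op = "+" then x + y else x * y

-- the inner 'for i, n in enumerate(row)' loop, carrying the running index i
def rowGo (ops : List String) (res : List Int) (i : Nat) : List Int → List Int
  | [] => res
  | n :: rest => rowGo ops (res.set i (applyOpA (ops.getD i "") (res.getD i 0) n)) (i + 1) rest

def do_operation (number_list : List (List Int)) (operations : List String) : Int :=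
  let result0 := operations.map (fun op => if op = "+" then (0 : Int) else 1)
  (number_list.foldl (fun res row => rowGo operations res 0 row) result0).sum

-- ===== PORT B =====
-- the inner 'for row in number_list' loop of one column, accumulating acc; the Python raises
-- KeyError in the final branch (unknown operator applied to a value) — unreachable inside Pre_,
-- so the port leaves acc unchanged there
def colGo (i : Nat) (op : String) (acc : Int) : List (List Int) → Int
  | [] => acc
  | row :: rest =>
      colGo i op
        (if i < row.length then
          (if op = "+" then acc + row.getD i 0
           else if op = "*" then acc * row.getD i 0
           else acc)
         else acc) rest

-- 'for i, op in enumerate(operations)' accumulating total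
def altGo (number_list : List (List Int)) (i : Nat) (total : Int) : List String → Int
  | [] => total
  | op :: rest =>
      altGo number_list (i + 1)
        (total + colGo i op (if op = "+" then 0 else 1) number_list) rest

def do_operation_alt (number_list : List (List Int)) (operations : List String) : Int :=
  altGo number_list 0 0 operations

-- ===== PRECONDITION & SPEC =====
-- Pre_ is exactly the set of inputs on which Python A returns: it excludes rows longer than
-- operations (IndexError) and operators other than '+'/'*' at an index some row reaches (KeyError).
def Pre_do_operation (number_list : List (List Int)) (operations : List String) : Prop :=
  (∀ row ∈ number_list, row.length ≤ operations.length) ∧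
  (∀ i < operations.length, (∃ row ∈ number_list, i < row.length) →
      operations.getD i "" = "+" ∨ operations.getD i "" = "*")
instance (number_list : List (List Int)) (operations : List String) : Decidable (Pre_do_operation number_list operations) := by unfold Pre_do_operation; infer_instance

def pvWitness_do_operation : List (List Int) × List String := ([[1, 2], [3, 4]], ["+", "*"])

def Spec_do_operation (number_list : List (List Int)) (operations : List String) (out : Int) : Prop := out = do_operation_alt number_list operations
instance (number_list : List (List Int)) (operations : List String) (out : Int) : Decidable (Spec_do_operation number_list operations out) := by unfold Spec_do_operation; infer_instance

-- ===== CLAIM (what is proved, stated in full; the proofs are below) =====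
def Claim_equal_do_operation : Prop := ∀ (number_list : List (List Int)) (operations : List String), Dom_do_operation number_list operations → Pre_do_operation number_list operations → Spec_do_operation number_list operations (do_operation number_list operations)

-- ===== LEMMAS AND PROOFS =====

-- the values of column j: [row[j] for row in number_list if j < len(row)]
def colVals (number_list : List (List Int)) (j : Nat) : List Int :=
  (number_list.filter (fun row => j < row.length)).map (fun row => row.getD j 0)

-- A's per-column fold, seeded with A's init value
def colFoldl (op : String) (s : Int) (l : List Int) : Int :=
  l.foldl (fun a n => applyOpA op a n) s

theorem rowGo_length (ops : List String) (row : List Int) :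
    ∀ (res : List Int) (i : Nat), (rowGo ops res i row).length = res.length := by
  induction row with
  | nil => intro res i; rfl
  | cons n rest ih => intro res i; simp [rowGo, ih]

theorem rowGo_getD (ops : List String) (row : List Int) :
    ∀ (res : List Int) (i : Nat), i + row.length ≤ res.length → ∀ (j : Nat),
      (rowGo ops res i row).getD j 0 =
        if i ≤ j ∧ j < i + row.length then
          applyOpA (ops.getD j "") (res.getD j 0) (row.getD (j - i) 0)
        else res.getD j 0 := by
  induction row with
  | nil => intro res i _ j; simp [rowGo]
  | cons n rest ih =>
    intro res i hlen j
    simp only [List.length_cons] at hlen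
    have hset : (res.set i (applyOpA (ops.getD i "") (res.getD i 0) n)).length = res.length := by
      simp
    rw [rowGo, ih _ (i + 1) (by rw [hset]; omega) j]
    have hi : i < res.length := by omega
    by_cases hji : j = i
    · subst hji
      rw [if_neg (by omega : ¬(j + 1 ≤ j ∧ j < j + 1 + rest.length)),
          if_pos (by simp only [List.length_cons]; omega : j ≤ j ∧ j < j + (n :: rest).length)]
      simp [List.getD_eq_getElem?_getD, hi]
    · have hgd : (res.set i (applyOpA (ops.getD i "") (res.getD i 0) n)).getD j 0 = res.getD j 0 := by
        simp [List.getD_eq_getElem?_getD, List.getElem?_set_ne (fun h => hji h.symm)]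
      by_cases hr : i + 1 ≤ j ∧ j < i + 1 + rest.length
      · rw [if_pos hr, if_pos (by simp only [List.length_cons]; omega : i ≤ j ∧ j < i + (n :: rest).length), hgd]
        congr 1
        have hsub : j - i = (j - (i + 1)) + 1 := by omega
        simp [hsub]
      · rw [if_neg hr, if_neg (by simp only [List.length_cons]; omega : ¬(i ≤ j ∧ j < i + (n :: rest).length)), hgd]

theorem foldl_rows_length (ops : List String) (nl : List (List Int)) :
    ∀ (res : List Int),
      (nl.foldl (fun r row => rowGo ops r 0 row) res).length = res.length := by
  induction nl with
  | nil => intro res; rfl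
  | cons row rest ih => intro res; simp [List.foldl_cons, ih, rowGo_length]

theorem colVals_cons (row : List Int) (rest : List (List Int)) (j : Nat) :
    colVals (row :: rest) j =
      if j < row.length then row.getD j 0 :: colVals rest j else colVals rest j := by
  by_cases h : j < row.length <;> simp [colVals, h]

theorem foldl_rows_getD (ops : List String) (nl : List (List Int)) :
    ∀ (res : List Int), res.length = ops.length →
      (∀ row ∈ nl, row.length ≤ ops.length) → ∀ (j : Nat),
      (nl.foldl (fun r row => rowGo ops r 0 row) res).getD j 0 =
        colFoldl (ops.getD j "") (res.getD j 0) (colVals nl j) := by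
  induction nl with
  | nil => intro res _ _ j; simp [colVals, colFoldl]
  | cons row rest ih =>
    intro res hlen hrows j
    have hrow : row.length ≤ ops.length := hrows row (by simp)
    have h1 : (rowGo ops res 0 row).length = ops.length := by rw [rowGo_length]; exact hlen
    rw [List.foldl_cons,
        ih (rowGo ops res 0 row) h1 (fun r hr => hrows r (by simp [hr])) j,
        rowGo_getD ops row res 0 (by omega) j, colVals_cons]
    by_cases hj : j < row.length
    · rw [if_pos hj, if_pos (by omega : 0 ≤ j ∧ j < 0 + row.length), Nat.sub_zero]
      simp [colFoldl]
    · rw [if_neg hj, if_neg (by omega : ¬(0 ≤ j ∧ j < 0 + row.length))]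

theorem colVals_ne_nil_iff (nl : List (List Int)) (j : Nat) :
    colVals nl j ≠ [] ↔ ∃ row ∈ nl, j < row.length := by
  simp only [colVals, ne_eq, List.map_eq_nil_iff, List.filter_eq_nil_iff]
  push Not
  simp

-- B's inner column loop computes A's per-column fold whenever the operator is valid
-- or the column is empty (the only cases Pre_ admits)
theorem colGo_eq_colFoldl (j : Nat) (op : String) :
    ∀ (nl : List (List Int)), (op = "+" ∨ op = "*" ∨ colVals nl j = []) →
      ∀ (acc : Int), colGo j op acc nl = colFoldl op acc (colVals nl j) := by
  intro nl
  induction nl with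
  | nil => intro _ acc; simp [colGo, colVals, colFoldl]
  | cons row rest ih =>
    intro h acc
    rw [colGo, colVals_cons]
    by_cases hj : j < row.length
    · rw [if_pos hj, if_pos hj]
      have hops : op = "+" ∨ op = "*" := by
        rcases h with h | h | h
        · exact Or.inl h
        · exact Or.inr h
        · rw [colVals_cons, if_pos hj] at h; exact absurd h (by simp)
      rcases hops with hop | hop
      · subst hop
        rw [if_pos rfl, ih (Or.inl rfl)]
        simp [colFoldl, applyOpA]
      · subst hop
        rw [if_neg (by decide), if_pos rfl, ih (Or.inr (Or.inl rfl))]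
        simp [colFoldl, applyOpA]
    · rw [if_neg hj, if_neg hj]
      apply ih
      rcases h with h | h | h
      · exact Or.inl h
      · exact Or.inr (Or.inl h)
      · rw [colVals_cons, if_neg hj] at h; exact Or.inr (Or.inr h)

theorem altGo_eq (nl : List (List Int)) (l : List String) :
    ∀ (i : Nat) (acc : Int) (r : List Int), r.length = l.length →
      (∀ k, k < l.length →
        r.getD k 0 = colGo (i + k) (l.getD k "") (if l.getD k "" = "+" then 0 else 1) nl) →
      acc + r.sum = altGo nl i acc l := by
  induction l with
  | nil =>
    intro i acc r hlen _
    have : r = [] := List.eq_nil_of_length_eq_zero hlen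
    simp [this, altGo]
  | cons op rest ih =>
    intro i acc r hlen hterm
    rcases r with _ | ⟨t, rs⟩
    · simp at hlen
    · have ht : t = colGo i op (if op = "+" then 0 else 1) nl := by
        have h0 := hterm 0 (by simp)
        simpa using h0
      have hrs : ∀ k, k < rest.length →
          rs.getD k 0 = colGo (i + 1 + k) (rest.getD k "") (if rest.getD k "" = "+" then 0 else 1) nl := by
        intro k hk
        have h := hterm (k + 1) (by simp only [List.length_cons]; omega)
        rw [show i + 1 + k = i + (k + 1) by omega]
        simpa using h
      rw [altGo, ← ih (i + 1) _ rs (by simpa using hlen) hrs, ht, List.sum_cons]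
      ring

-- ===== VERDICT (by name: the statement is the Claim_ definition above) =====
theorem do_operation_spec : Claim_equal_do_operation := by
  intro nl ops _ hpre
  obtain ⟨hrows, hops⟩ := hpre
  unfold Spec_do_operation do_operation do_operation_alt
  set init := ops.map (fun op => if op = "+" then (0 : Int) else 1) with hinit
  have hinitlen : init.length = ops.length := by simp [hinit]
  have hfinlen : (nl.foldl (fun r row => rowGo ops r 0 row) init).length = ops.length := by
    rw [foldl_rows_length]; exact hinitlen
  have hinitget : ∀ k, k < ops.length →
      init.getD k 0 = (if ops.getD k "" = "+" then (0 : Int) else 1) := by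
    intro k hk
    simp [hinit, List.getD_eq_getElem?_getD, List.getElem?_map,
      List.getElem?_eq_getElem hk]
  have hterm : ∀ k, k < ops.length →
      (nl.foldl (fun r row => rowGo ops r 0 row) init).getD k 0 =
        colGo (0 + k) (ops.getD k "") (if ops.getD k "" = "+" then 0 else 1) nl := by
    intro k hk
    rw [foldl_rows_getD ops nl init hinitlen hrows k, hinitget k hk, Nat.zero_add]
    refine (colGo_eq_colFoldl k (ops.getD k "") nl ?_ _).symm
    by_cases hne : colVals nl k = []
    · exact Or.inr (Or.inr hne)
    · rcases hops k hk ((colVals_ne_nil_iff nl k).mp hne) with h | h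
      · exact Or.inl h
      · exact Or.inr (Or.inl h)
  have := altGo_eq nl ops 0 0 (nl.foldl (fun r row => rowGo ops r 0 row) init) hfinlen hterm
  simpa using this
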